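-- pv_equiv track=rewrite | github.com/kocherlab/HalictidCompGen | annotation/make_ogs_hic.py | longest_iso
-- ===== SOURCE A (Python) =====
-- def longest_iso(gene_list, iso_dic):
--     longest_list = []
--     for gene in gene_list:
--         cur_isos = []
--         for k, v in iso_dic.items():
--             cur_id = k.split("-")[0]
--             if cur_id == gene:
--                 cur_isos.append(k)
--         longest = ""
--         longest_length = 0
--         for iso in cur_isos:
--             if len(iso_dic[iso]) > longest_length:
--                 longest = iso
--                 longest_length = len(iso_dic[iso])
--
--         longest_list.append(longest)
--     return longest_list
-- ===== SOURCE B (Python) =====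
-- def longest_iso(gene_list, iso_dic):
--     best = {}
--     for k, v in iso_dic.items():
--         g = k.split("-")[0]
--         if len(v) > best.get(g, ("", 0))[1]:
--             best[g] = (k, len(v))
--     return [best.get(g, ("", 0))[0] for g in gene_list]
-- ===== Notes on version B (the rewrite author's own statement) =====
-- stated objective: faster
-- what changed: Instead of rescanning the whole dict for every gene and then re-looking up each candidate, B makes one pass over iso_dic building a gene -> (best key, best length) map and answers each gene by a single lookup; Pre_ only excludes association lists with duplicate keys, which cannot arise from a Python dict.
import Mathlib
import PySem

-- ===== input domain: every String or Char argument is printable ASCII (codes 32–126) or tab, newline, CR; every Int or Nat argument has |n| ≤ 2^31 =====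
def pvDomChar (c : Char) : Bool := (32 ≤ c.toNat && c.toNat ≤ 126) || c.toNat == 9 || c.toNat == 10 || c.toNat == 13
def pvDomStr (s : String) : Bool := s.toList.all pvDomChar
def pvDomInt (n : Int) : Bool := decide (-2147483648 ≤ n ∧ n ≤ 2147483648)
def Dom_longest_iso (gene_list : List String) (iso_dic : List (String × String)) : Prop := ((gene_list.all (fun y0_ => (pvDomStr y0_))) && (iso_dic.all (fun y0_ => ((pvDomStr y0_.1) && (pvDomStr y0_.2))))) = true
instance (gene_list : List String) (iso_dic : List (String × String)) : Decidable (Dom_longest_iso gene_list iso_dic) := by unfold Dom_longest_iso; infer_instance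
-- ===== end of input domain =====

-- B replaces A's per-gene rescan of the whole dict by one grouping pass (gene -> best key) plus a lookup per gene.

-- ===== PORT A =====
-- k.split("-")[0]: "-" is nonempty so split? is `some`, and the split is nonempty so [0] is its head
def pvGeneOf (k : String) : String := ((PySem.Str.split? k "-").getD []).headD ""

def longest_iso (gene_list : List String) (iso_dic : List (String × String)) : List String :=
  gene_list.foldl (fun longest_list gene =>
    longest_list ++
      [((iso_dic.foldl (fun cur_isos kv =>
            if pvGeneOf kv.1 == gene then cur_isos ++ [kv.1] else cur_isos) []).foldl
          (fun (p : String × Int) iso =>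
            if PySem.Str.len ((PySem.Dict.mk iso_dic).getD iso "") > p.2
            then (iso, PySem.Str.len ((PySem.Dict.mk iso_dic).getD iso ""))
            else p) ("", 0)).1]) []

-- ===== PORT B =====
def longest_iso_alt (gene_list : List String) (iso_dic : List (String × String)) : List String :=
  gene_list.map (fun g =>
    ((iso_dic.foldl (fun (best : PySem.Dict String (String × Int)) kv =>
        if PySem.Str.len kv.2 > (best.getD (pvGeneOf kv.1) ("", 0)).2
        then best.insert (pvGeneOf kv.1) (kv.1, PySem.Str.len kv.2)
        else best) PySem.Dict.empty).getD g ("", 0)).1)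

-- ===== PRECONDITION & SPEC =====
-- Pre_ excludes association lists with duplicate keys, which cannot arise from a Python dict argument.
def Pre_longest_iso (gene_list : List String) (iso_dic : List (String × String)) : Prop :=
  (iso_dic.map Prod.fst).Nodup
instance (gene_list : List String) (iso_dic : List (String × String)) : Decidable (Pre_longest_iso gene_list iso_dic) := by unfold Pre_longest_iso; infer_instance
def pvWitness_longest_iso : List String × (List (String × String)) := (["g1", "g2"], [("g1-i1", "ATG"), ("g1-i2", "ATGATG")])

def Spec_longest_iso (gene_list : List String) (iso_dic : List (String × String)) (out : List String) : Prop := out = longest_iso_alt gene_list iso_dic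
instance (gene_list : List String) (iso_dic : List (String × String)) (out : List String) : Decidable (Spec_longest_iso gene_list iso_dic out) := by unfold Spec_longest_iso; infer_instance

-- ===== CLAIM (what is proved, stated in full; the proofs are below) =====
def Claim_equal_longest_iso : Prop := ∀ (gene_list : List String) (iso_dic : List (String × String)), Dom_longest_iso gene_list iso_dic → Pre_longest_iso gene_list iso_dic → Spec_longest_iso gene_list iso_dic (longest_iso gene_list iso_dic)

-- ===== LEMMAS AND PROOFS =====

-- the common per-gene "best so far" step, folded over candidate pairs
def pvStep (g : String) (p : String × Int) (kv : String × String) : String × Int :=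
  if pvGeneOf kv.1 == g then
    (if PySem.Str.len kv.2 > p.2 then (kv.1, PySem.Str.len kv.2) else p)
  else p

-- A's cur_isos fold is the filtered key list
theorem curIsos_eq (d : List (String × String)) (g : String) (acc : List String) :
    d.foldl (fun cur_isos kv => if pvGeneOf kv.1 == g then cur_isos ++ [kv.1] else cur_isos) acc
      = acc ++ (d.filter (fun kv => pvGeneOf kv.1 == g)).map Prod.fst := by
  induction d generalizing acc with
  | nil => simp
  | cons kv t ih =>
    simp only [List.foldl_cons, List.filter_cons]
    by_cases h : (pvGeneOf kv.1 == g) = true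
    · rw [if_pos h, if_pos h, ih]; simp
    · rw [if_neg h, if_neg h, ih]

-- with nodup keys, dict lookup of a member key returns its paired value
theorem lookup_mem (d : List (String × String)) (hnd : (d.map Prod.fst).Nodup)
    (kv : String × String) (hm : kv ∈ d) :
    (PySem.Dict.mk d).getD kv.1 "" = kv.2 := by
  induction d with
  | nil => cases hm
  | cons hd t ih =>
    obtain ⟨a, b⟩ := hd
    simp only [List.map_cons, List.nodup_cons] at hnd
    simp only [PySem.Dict.getD, PySem.Dict.get?_mk_cons]
    rcases List.mem_cons.mp hm with h | h
    · subst h; simp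
    · have hne : (a == kv.1) = false := by
        simp only [beq_eq_false_iff_ne]
        intro he; exact hnd.1 (he ▸ List.mem_map_of_mem h)
      rw [hne]
      simpa [PySem.Dict.getD] using ih hnd.2 h

-- A's per-gene selection fold over the filtered keys equals the direct fold over the pairs
theorem foldA_eq (d l : List (String × String)) (hnd : (d.map Prod.fst).Nodup)
    (hsub : ∀ kv ∈ l, kv ∈ d) (g : String) (p : String × Int) :
    (l.map Prod.fst).foldl (fun p iso =>
        if PySem.Str.len ((PySem.Dict.mk d).getD iso "") > p.2
        then (iso, PySem.Str.len ((PySem.Dict.mk d).getD iso ""))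
        else p) p
      = l.foldl (fun p kv =>
          if PySem.Str.len kv.2 > p.2 then (kv.1, PySem.Str.len kv.2) else p) p := by
  induction l generalizing p with
  | nil => rfl
  | cons kv t ih =>
    have hv := lookup_mem d hnd kv (hsub kv (List.mem_cons_self ..))
    simp only [List.map_cons, List.foldl_cons, hv]
    exact ih (fun x hx => hsub x (List.mem_cons_of_mem _ hx)) _

-- B's grouping fold, read back at any gene g, is the guarded fold over all pairs
theorem foldB_eq (d : List (String × String)) (best : PySem.Dict String (String × Int)) (g : String) :
    ((d.foldl (fun (best : PySem.Dict String (String × Int)) kv =>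
        if PySem.Str.len kv.2 > (best.getD (pvGeneOf kv.1) ("", 0)).2
        then best.insert (pvGeneOf kv.1) (kv.1, PySem.Str.len kv.2)
        else best) best).getD g ("", 0))
      = d.foldl (pvStep g) (best.getD g ("", 0)) := by
  induction d generalizing best with
  | nil => rfl
  | cons kv t ih =>
    simp only [List.foldl_cons, pvStep]
    by_cases hl : PySem.Str.len kv.2 > (best.getD (pvGeneOf kv.1) ("", 0)).2
    · rw [if_pos hl, ih]
      congr 1
      rw [PySem.Dict.getD_insert]
      by_cases hg : g = pvGeneOf kv.1
      · subst hg
        rw [if_pos rfl, if_pos (by simp), if_pos hl]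
      · have hb : (pvGeneOf kv.1 == g) = false := by
          simp only [beq_eq_false_iff_ne]; exact fun he => hg he.symm
        rw [if_neg hg, hb]
        simp
    · rw [if_neg hl, ih]
      congr 1
      by_cases hg : pvGeneOf kv.1 = g
      · rw [hg] at hl
        rw [if_pos (by simp [hg]), if_neg hl]
      · have hb : (pvGeneOf kv.1 == g) = false := by
          simp only [beq_eq_false_iff_ne]; exact hg
        rw [hb]; simp

-- the guarded fold is the fold over the filtered list
theorem guard_filter (d : List (String × String)) (g : String) (p : String × Int) :
    d.foldl (pvStep g) p
      = (d.filter (fun kv => pvGeneOf kv.1 == g)).foldl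
          (fun p kv => if PySem.Str.len kv.2 > p.2 then (kv.1, PySem.Str.len kv.2) else p) p := by
  rw [List.foldl_filter]
  induction d generalizing p with
  | nil => rfl
  | cons kv t ih =>
    simp only [List.foldl_cons, pvStep]
    by_cases h : (pvGeneOf kv.1 == g) = true
    · rw [if_pos h]; exact ih _
    · rw [if_neg h]; exact ih _

-- appending one result per element is a map
theorem foldl_append_singleton (l : List String) (f : String → String) (acc : List String) :
    l.foldl (fun a g => a ++ [f g]) acc = acc ++ l.map f := by
  induction l generalizing acc with
  | nil => simp
  | cons x t ih => simp [ih]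

-- ===== VERDICT (by name: the statement is the Claim_ definition above) =====
theorem longest_iso_spec : Claim_equal_longest_iso := by
  intro gene_list iso_dic _ hpre
  unfold Spec_longest_iso longest_iso longest_iso_alt
  have hgene : ∀ g : String,
      ((iso_dic.foldl (fun cur_isos kv =>
          if pvGeneOf kv.1 == g then cur_isos ++ [kv.1] else cur_isos) []).foldl
        (fun (p : String × Int) iso =>
          if PySem.Str.len ((PySem.Dict.mk iso_dic).getD iso "") > p.2
          then (iso, PySem.Str.len ((PySem.Dict.mk iso_dic).getD iso ""))
          else p) ("", 0))
      = ((iso_dic.foldl (fun (best : PySem.Dict String (String × Int)) kv =>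
          if PySem.Str.len kv.2 > (best.getD (pvGeneOf kv.1) ("", 0)).2
          then best.insert (pvGeneOf kv.1) (kv.1, PySem.Str.len kv.2)
          else best) PySem.Dict.empty).getD g ("", 0)) := by
    intro g
    rw [curIsos_eq, List.nil_append,
      foldA_eq iso_dic _ hpre (fun kv hkv => (List.mem_filter.mp hkv).1) g,
      foldB_eq, guard_filter]
    rfl
  rw [foldl_append_singleton gene_list _ [], List.nil_append]
  exact List.map_congr_left (fun g _ => congrArg Prod.fst (hgene g))
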